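-- pv_equiv track=rewrite | github.com/Joseph-Chou911/fred-cache | tools/update_tsmc_quarterly_eps_tracker.py | choose_representative_failure
-- ===== SOURCE A (Python) =====
-- from typing import Any, Dict, List, Optional, Tuple
--
-- FAILURE_CLASS_HTTP = "HTTP_ERROR"
--
-- FAILURE_CLASS_NOT_FOUND = "MOPS_NOT_FOUND"
--
-- FAILURE_CLASS_PARSE = "MOPS_PARSE_FAILED"
--
-- FAILURE_CLASS_MISMATCH = "EPS_MISMATCH"
--
-- FAILURE_CLASS_Q4_DEP = "Q4_DIFF_DEPENDENCY_FAILED"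
--
-- def choose_representative_failure(
--     attempts: List[Dict[str, Any]]
-- ) -> Tuple[str, Optional[Dict[str, Any]], Optional[Dict[str, Any]]]:
--     if not attempts:
--         return FAILURE_CLASS_PARSE, None, None
--
--     first = attempts[0]
--     last = attempts[-1]
--
--     priority = [
--         FAILURE_CLASS_HTTP,
--         FAILURE_CLASS_NOT_FOUND,
--         FAILURE_CLASS_Q4_DEP,
--         FAILURE_CLASS_PARSE,
--         FAILURE_CLASS_MISMATCH,
--     ]
--     for klass in priority:
--         for a in attempts:
--             if str(a.get("failure_class", "")) == klass:
--                 return klass, first, last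
--
--     return str(last.get("failure_class", FAILURE_CLASS_PARSE)), first, last
-- ===== SOURCE B (Python) =====
-- from typing import Any, Dict, List, Optional, Tuple
--
-- FAILURE_CLASS_HTTP = "HTTP_ERROR"
-- FAILURE_CLASS_NOT_FOUND = "MOPS_NOT_FOUND"
-- FAILURE_CLASS_PARSE = "MOPS_PARSE_FAILED"
-- FAILURE_CLASS_MISMATCH = "EPS_MISMATCH"
-- FAILURE_CLASS_Q4_DEP = "Q4_DIFF_DEPENDENCY_FAILED"
--
--
-- def choose_representative_failure(
--     attempts: List[Dict[str, Any]]
-- ) -> Tuple[str, Optional[Dict[str, Any]], Optional[Dict[str, Any]]]: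
--     if not attempts:
--         return FAILURE_CLASS_PARSE, None, None
--
--     first = attempts[0]
--     last = attempts[-1]
--
--     priority = [
--         FAILURE_CLASS_HTTP,
--         FAILURE_CLASS_NOT_FOUND,
--         FAILURE_CLASS_Q4_DEP,
--         FAILURE_CLASS_PARSE,
--         FAILURE_CLASS_MISMATCH,
--     ]
--     rank = {k: i for i, k in enumerate(priority)}
--
--     best = None
--     for a in attempts:
--         r = rank.get(str(a.get("failure_class", "")))
--         if r is not None and (best is None or r < best):
--             best = r
--
--     if best is not None:
--         return priority[best], first, last
--     return str(last.get("failure_class", FAILURE_CLASS_PARSE)), first, last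
-- ===== Notes on version B (the rewrite author's own statement) =====
-- stated objective: alternative
-- what changed: A rescans the whole attempts list once per priority class (5 passes with early return); B builds a class-to-rank dict once and makes a single pass over attempts keeping the minimum rank seen, indexing the priority list at the end; empty-input and no-match fallbacks are unchanged.
import Mathlib
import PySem

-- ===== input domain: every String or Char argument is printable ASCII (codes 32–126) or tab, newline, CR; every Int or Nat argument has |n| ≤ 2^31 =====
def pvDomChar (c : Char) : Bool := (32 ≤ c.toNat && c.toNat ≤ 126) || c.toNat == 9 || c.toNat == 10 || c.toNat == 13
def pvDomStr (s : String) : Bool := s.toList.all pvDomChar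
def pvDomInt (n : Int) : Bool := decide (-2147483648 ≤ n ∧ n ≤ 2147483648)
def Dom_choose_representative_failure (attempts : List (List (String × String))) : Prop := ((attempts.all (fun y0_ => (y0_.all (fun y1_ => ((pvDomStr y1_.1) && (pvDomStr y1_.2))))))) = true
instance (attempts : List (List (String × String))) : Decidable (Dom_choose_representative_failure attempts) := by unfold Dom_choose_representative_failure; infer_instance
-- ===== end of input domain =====

-- B replaces A's five full scans of `attempts` (one per priority class) by a single pass
-- that keeps the minimum priority rank seen so far (objective: alternative single-pass algorithm).

-- ===== PORT A =====
-- inner `for a in attempts: if str(a.get("failure_class","")) == klass: return …` (only the hit matters)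
def pvAInner (attempts : List (List (String × String))) (klass : String) : Bool :=
  match attempts with
  | [] => false
  | a :: rest =>
      if ((PySem.Dict.mk a).getD "failure_class" "") == klass then true
      else pvAInner rest klass

-- outer `for klass in priority:` with early return of the first klass that has a hit
def pvAOuter (attempts : List (List (String × String))) : List String → Option String
  | [] => none
  | k :: rest => if pvAInner attempts k then some k else pvAOuter attempts rest

def choose_representative_failure (attempts : List (List (String × String))) : String × (Option (List (String × String))) × (Option (List (String × String))) :=
  if attempts.isEmpty then ("MOPS_PARSE_FAILED", none, none)
  else
    let first := PySem.List.pyGet? attempts 0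
    let last := PySem.List.pyGet? attempts (-1)
    match pvAOuter attempts ["HTTP_ERROR", "MOPS_NOT_FOUND", "Q4_DIFF_DEPENDENCY_FAILED", "MOPS_PARSE_FAILED", "EPS_MISMATCH"] with
    | some k => (k, first, last)
    | none =>
      match last with
      | some l => ((PySem.Dict.mk l).getD "failure_class" "MOPS_PARSE_FAILED", first, last)
      | none => ("MOPS_PARSE_FAILED", first, last)  -- unreachable: attempts ≠ []

-- ===== PORT B =====
def pvPriority : List String :=
  ["HTTP_ERROR", "MOPS_NOT_FOUND", "Q4_DIFF_DEPENDENCY_FAILED", "MOPS_PARSE_FAILED", "EPS_MISMATCH"]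

-- `rank = {k: i for i, k in enumerate(priority)}` (a constant dict; written out literally)
def pvRankDict : PySem.Dict String Int :=
  PySem.Dict.mk [("HTTP_ERROR", 0), ("MOPS_NOT_FOUND", 1), ("Q4_DIFF_DEPENDENCY_FAILED", 2), ("MOPS_PARSE_FAILED", 3), ("EPS_MISMATCH", 4)]

-- loop body: `r = rank.get(str(a.get("failure_class",""))); if r is not None and (best is None or r < best): best = r`
def pvBStep (best : Option Int) (a : List (String × String)) : Option Int :=
  match pvRankDict.get? ((PySem.Dict.mk a).getD "failure_class" "") with
  | none => best
  | some r =>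
    match best with
    | none => some r
    | some b => if r < b then some r else best

def choose_representative_failure_alt (attempts : List (List (String × String))) : String × (Option (List (String × String))) × (Option (List (String × String))) :=
  if attempts.isEmpty then ("MOPS_PARSE_FAILED", none, none)
  else
    let first := PySem.List.pyGet? attempts 0
    let last := PySem.List.pyGet? attempts (-1)
    match attempts.foldl pvBStep none with
    | some r =>
      match PySem.List.pyGet? pvPriority r with
      | some p => (p, first, last)
      | none => ("", first, last)  -- unreachable: r is a rank 0..4
    | none =>
      match last with
      | some l => ((PySem.Dict.mk l).getD "failure_class" "MOPS_PARSE_FAILED", first, last)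
      | none => ("MOPS_PARSE_FAILED", first, last)  -- unreachable: attempts ≠ []

-- ===== PRECONDITION & SPEC =====
def Spec_choose_representative_failure (attempts : List (List (String × String))) (out : String × (Option (List (String × String))) × (Option (List (String × String)))) : Prop := out = choose_representative_failure_alt attempts
instance (attempts : List (List (String × String))) (out : String × (Option (List (String × String))) × (Option (List (String × String)))) : Decidable (Spec_choose_representative_failure attempts out) := by unfold Spec_choose_representative_failure; infer_instance

-- ===== CLAIM (what is proved, stated in full; the proofs are below) =====
def Claim_equal_choose_representative_failure : Prop := ∀ (attempts : List (List (String × String))), Dom_choose_representative_failure attempts → Spec_choose_representative_failure attempts (choose_representative_failure attempts)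

-- ===== LEMMAS AND PROOFS =====

-- the key looked up by both programs
def pvKey (a : List (String × String)) : String := (PySem.Dict.mk a).getD "failure_class" ""

-- min on Option Int (none = "nothing seen yet")
def pvOmin (x y : Option Int) : Option Int :=
  match x, y with
  | none, y => y
  | some a, none => some a
  | some a, some b => some (min a b)

theorem pvOmin_none_right (x : Option Int) : pvOmin x none = x := by
  cases x <;> rfl

theorem pvOmin_assoc (x y z : Option Int) : pvOmin (pvOmin x y) z = pvOmin x (pvOmin y z) := by
  cases x <;> cases y <;> cases z <;> simp [pvOmin, min_assoc]

theorem pvBStep_eq (b : Option Int) (a : List (String × String)) :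
    pvBStep b a = pvOmin b (pvRankDict.get? (pvKey a)) := by
  unfold pvBStep pvKey
  cases h : pvRankDict.get? ((PySem.Dict.mk a).getD "failure_class" "") with
  | none => cases b <;> rfl
  | some r =>
    cases b with
    | none => rfl
    | some m =>
      simp only [pvOmin]
      split_ifs with hr
      · simp only [Option.some.injEq]; omega
      · simp only [Option.some.injEq]; omega

def pvBest (l : List (List (String × String))) : Option Int := l.foldl pvBStep none

theorem pvFoldl_acc (l : List (List (String × String))) :
    ∀ b, l.foldl pvBStep b = pvOmin b (pvBest l) := by
  induction l with
  | nil => intro b; simp [pvBest, pvOmin_none_right]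
  | cons a t ih =>
    intro b
    simp only [pvBest, List.foldl_cons]
    rw [ih, ih (pvBStep none a), pvBStep_eq, pvBStep_eq none a, ← pvOmin_assoc]
    rfl

-- the nested-scan result of A, expressed as the minimal rank present
def pvChain (l : List (List (String × String))) : Option Int :=
  if pvAInner l "HTTP_ERROR" then some 0
  else if pvAInner l "MOPS_NOT_FOUND" then some 1
  else if pvAInner l "Q4_DIFF_DEPENDENCY_FAILED" then some 2
  else if pvAInner l "MOPS_PARSE_FAILED" then some 3
  else if pvAInner l "EPS_MISMATCH" then some 4
  else none

theorem pvRank_get?_of_ne (s : String)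
    (h0 : s ≠ "HTTP_ERROR") (h1 : s ≠ "MOPS_NOT_FOUND") (h2 : s ≠ "Q4_DIFF_DEPENDENCY_FAILED")
    (h3 : s ≠ "MOPS_PARSE_FAILED") (h4 : s ≠ "EPS_MISMATCH") :
    pvRankDict.get? s = none := by
  have e0 : (("HTTP_ERROR" : String) == s) = false := beq_eq_false_iff_ne.mpr (Ne.symm h0)
  have e1 : (("MOPS_NOT_FOUND" : String) == s) = false := beq_eq_false_iff_ne.mpr (Ne.symm h1)
  have e2 : (("Q4_DIFF_DEPENDENCY_FAILED" : String) == s) = false := beq_eq_false_iff_ne.mpr (Ne.symm h2)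
  have e3 : (("MOPS_PARSE_FAILED" : String) == s) = false := beq_eq_false_iff_ne.mpr (Ne.symm h3)
  have e4 : (("EPS_MISMATCH" : String) == s) = false := beq_eq_false_iff_ne.mpr (Ne.symm h4)
  unfold pvRankDict
  simp only [PySem.Dict.get?_mk_cons, e0, e1, e2, e3, e4, if_false]
  rfl

theorem pvBest_eq_chain (l : List (List (String × String))) : pvBest l = pvChain l := by
  induction l with
  | nil => rfl
  | cons a t ih =>
    have hb : pvBest (a :: t) = pvOmin (pvRankDict.get? (pvKey a)) (pvChain t) := by
      simp only [pvBest, List.foldl_cons]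
      rw [pvFoldl_acc, pvBStep_eq, ih]
      rfl
    rw [hb]
    have hinner : ∀ k, pvAInner (a :: t) k = if pvKey a == k then true else pvAInner t k := by
      intro k; rfl
    by_cases h0 : pvKey a = "HTTP_ERROR"
    · have hg : pvRankDict.get? (pvKey a) = some 0 := by rw [h0]; rfl
      rw [hg]
      cases hb0 : pvAInner t "HTTP_ERROR" <;> cases hb1 : pvAInner t "MOPS_NOT_FOUND" <;> cases hb2 : pvAInner t "Q4_DIFF_DEPENDENCY_FAILED" <;> cases hb3 : pvAInner t "MOPS_PARSE_FAILED" <;> cases hb4 : pvAInner t "EPS_MISMATCH" <;>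
        simp [pvChain, hinner, h0, hb0, hb1, hb2, hb3, hb4, pvOmin]
    · by_cases h1 : pvKey a = "MOPS_NOT_FOUND"
      · have hg : pvRankDict.get? (pvKey a) = some 1 := by rw [h1]; rfl
        rw [hg]
        cases hb0 : pvAInner t "HTTP_ERROR" <;> cases hb1 : pvAInner t "MOPS_NOT_FOUND" <;> cases hb2 : pvAInner t "Q4_DIFF_DEPENDENCY_FAILED" <;> cases hb3 : pvAInner t "MOPS_PARSE_FAILED" <;> cases hb4 : pvAInner t "EPS_MISMATCH" <;>
          simp [pvChain, hinner, h1, hb0, hb1, hb2, hb3, hb4, pvOmin]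
      · by_cases h2 : pvKey a = "Q4_DIFF_DEPENDENCY_FAILED"
        · have hg : pvRankDict.get? (pvKey a) = some 2 := by rw [h2]; rfl
          rw [hg]
          cases hb0 : pvAInner t "HTTP_ERROR" <;> cases hb1 : pvAInner t "MOPS_NOT_FOUND" <;> cases hb2 : pvAInner t "Q4_DIFF_DEPENDENCY_FAILED" <;> cases hb3 : pvAInner t "MOPS_PARSE_FAILED" <;> cases hb4 : pvAInner t "EPS_MISMATCH" <;>
            simp [pvChain, hinner, h2, hb0, hb1, hb2, hb3, hb4, pvOmin]
        · by_cases h3 : pvKey a = "MOPS_PARSE_FAILED"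
          · have hg : pvRankDict.get? (pvKey a) = some 3 := by rw [h3]; rfl
            rw [hg]
            cases hb0 : pvAInner t "HTTP_ERROR" <;> cases hb1 : pvAInner t "MOPS_NOT_FOUND" <;> cases hb2 : pvAInner t "Q4_DIFF_DEPENDENCY_FAILED" <;> cases hb3 : pvAInner t "MOPS_PARSE_FAILED" <;> cases hb4 : pvAInner t "EPS_MISMATCH" <;>
              simp [pvChain, hinner, h3, hb0, hb1, hb2, hb3, hb4, pvOmin]
          · by_cases h4 : pvKey a = "EPS_MISMATCH"
            · have hg : pvRankDict.get? (pvKey a) = some 4 := by rw [h4]; rfl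
              rw [hg]
              cases hb0 : pvAInner t "HTTP_ERROR" <;> cases hb1 : pvAInner t "MOPS_NOT_FOUND" <;> cases hb2 : pvAInner t "Q4_DIFF_DEPENDENCY_FAILED" <;> cases hb3 : pvAInner t "MOPS_PARSE_FAILED" <;> cases hb4 : pvAInner t "EPS_MISMATCH" <;>
                simp [pvChain, hinner, h4, hb0, hb1, hb2, hb3, hb4, pvOmin]
            · rw [pvRank_get?_of_ne _ h0 h1 h2 h3 h4]
              have e0 : (pvKey a == "HTTP_ERROR") = false := beq_eq_false_iff_ne.mpr h0
              have e1 : (pvKey a == "MOPS_NOT_FOUND") = false := beq_eq_false_iff_ne.mpr h1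
              have e2 : (pvKey a == "Q4_DIFF_DEPENDENCY_FAILED") = false := beq_eq_false_iff_ne.mpr h2
              have e3 : (pvKey a == "MOPS_PARSE_FAILED") = false := beq_eq_false_iff_ne.mpr h3
              have e4 : (pvKey a == "EPS_MISMATCH") = false := beq_eq_false_iff_ne.mpr h4
              simp only [pvChain, hinner, e0, e1, e2, e3, e4, Bool.false_eq_true, if_false]
              rfl

-- ===== VERDICT (by name: the statement is the Claim_ definition above) =====
theorem choose_representative_failure_spec : Claim_equal_choose_representative_failure := by
  intro attempts _
  unfold Spec_choose_representative_failure
  cases attempts with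
  | nil => rfl
  | cons a t =>
    unfold choose_representative_failure choose_representative_failure_alt
    have hfold : (a :: t).foldl pvBStep none = pvChain (a :: t) := pvBest_eq_chain (a :: t)
    simp only [List.isEmpty_cons, Bool.false_eq_true, if_false, hfold]
    simp only [pvAOuter, pvChain]
    split_ifs <;> rfl
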